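-- pv_equiv track=rewrite | github.com/AkshatSharma31/Quantum-Assembly-Theory | scripts/Sk_Calculator.py | is_valid_cycle
-- ===== SOURCE A (Python) =====
-- def is_valid_cycle(cycle, bcp_set):
--     """
--     Check that the cycle atoms form a genuine simple ring in the BCP graph.
--
--     Condition: every atom in the cycle must have exactly 2 neighbours
--     within the cycle that are connected by real BCPs. This is the
--     necessary and sufficient condition for a set of atoms to form a
--     simple ring, independent of the order atoms were enumerated.
--
--     This correctly rejects composite path artifacts in fused polycyclic
--     systems where the DFS finds closed walks that are not simple rings.
--     It also correctly accepts valid rings regardless of atom ordering.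
--     """
--     cycle_set = set(cycle)
--     for atom in cycle:
--         bcp_neighbors_in_cycle = [
--             n for n in cycle_set
--             if n != atom and tuple(sorted((atom, n))) in bcp_set
--         ]
--         if len(bcp_neighbors_in_cycle) != 2:
--             return False
--     return True
-- ===== SOURCE B (Python) =====
-- def is_valid_cycle(cycle, bcp_set):
--     # Edge-driven: one pass over the distinct BCP pairs accumulating in-cycle
--     # degrees, then check every cycle atom has degree exactly 2.
--     atoms = set(cycle)
--     deg = {}
--     for u, v in set(bcp_set):
--         if u < v and u in atoms and v in atoms:
--             deg[u] = deg.get(u, 0) + 1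
--             deg[v] = deg.get(v, 0) + 1
--     return all(deg.get(a, 0) == 2 for a in atoms)
-- ===== Notes on version B (the rewrite author's own statement) =====
-- stated objective: faster
-- what changed: Instead of rescanning the whole cycle set per atom to collect its BCP neighbours (with list-membership tests per candidate pair), B makes one edge-driven pass over the distinct BCP pairs accumulating an in-cycle degree counter dict, then checks every cycle atom has degree exactly 2.
import Mathlib
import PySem

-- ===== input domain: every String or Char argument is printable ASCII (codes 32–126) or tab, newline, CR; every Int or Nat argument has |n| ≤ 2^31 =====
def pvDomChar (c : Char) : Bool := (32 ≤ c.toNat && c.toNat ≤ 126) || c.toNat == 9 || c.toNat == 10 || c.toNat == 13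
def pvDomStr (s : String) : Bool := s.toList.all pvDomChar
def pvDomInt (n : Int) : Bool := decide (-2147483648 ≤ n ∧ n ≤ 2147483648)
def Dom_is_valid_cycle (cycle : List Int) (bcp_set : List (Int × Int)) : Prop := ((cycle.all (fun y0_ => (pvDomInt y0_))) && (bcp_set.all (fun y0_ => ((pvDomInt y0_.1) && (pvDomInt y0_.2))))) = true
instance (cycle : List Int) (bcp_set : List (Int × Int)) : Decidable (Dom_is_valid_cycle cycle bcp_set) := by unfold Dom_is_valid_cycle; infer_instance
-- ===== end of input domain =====

-- B replaces A's per-atom rescan of the whole cycle set by a single edge-driven pass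
-- over the distinct BCP pairs that accumulates a degree counter (objective: faster).

-- ===== PORT A =====
-- tuple(sorted((a, b))) for a 2-tuple of ints
def pySortPair (a b : Int) : Int × Int := if a ≤ b then (a, b) else (b, a)

def is_valid_cycle (cycle : List Int) (bcp_set : List (Int × Int)) : Bool :=
  let cycle_set : PySem.Set Int := PySem.Set.ofList cycle
  cycle.all (fun atom =>
    let bcp_neighbors_in_cycle :=
      cycle_set.filter (fun n => n != atom && bcp_set.contains (pySortPair atom n))
    bcp_neighbors_in_cycle.length == 2)

-- ===== PORT B =====
def is_valid_cycle_alt (cycle : List Int) (bcp_set : List (Int × Int)) : Bool :=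
  let atoms : PySem.Set Int := PySem.Set.ofList cycle
  let deg : PySem.Dict Int Int :=
    (PySem.Set.ofList bcp_set).foldl (fun d p =>
      if decide (p.1 < p.2) && atoms.contains p.1 && atoms.contains p.2 then
        let d1 := d.insert p.1 (d.getD p.1 0 + 1)
        d1.insert p.2 (d1.getD p.2 0 + 1)
      else d) PySem.Dict.empty
  atoms.all (fun a => deg.getD a 0 == 2)

-- ===== PRECONDITION & SPEC =====
def Spec_is_valid_cycle (cycle : List Int) (bcp_set : List (Int × Int)) (out : Bool) : Prop := out = is_valid_cycle_alt cycle bcp_set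
instance (cycle : List Int) (bcp_set : List (Int × Int)) (out : Bool) : Decidable (Spec_is_valid_cycle cycle bcp_set out) := by unfold Spec_is_valid_cycle; infer_instance

-- ===== CLAIM (what is proved, stated in full; the proofs are below) =====
def Claim_equal_is_valid_cycle : Prop := ∀ (cycle : List Int) (bcp_set : List (Int × Int)), Dom_is_valid_cycle cycle bcp_set → Spec_is_valid_cycle cycle bcp_set (is_valid_cycle cycle bcp_set)

-- ===== LEMMAS AND PROOFS =====

-- the per-edge test of B, and B's predicate Q_x counting edges incident to x
def pvOk (atoms : List Int) (p : Int × Int) : Bool :=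
  decide (p.1 < p.2) && atoms.contains p.1 && atoms.contains p.2

def pvQ (atoms : List Int) (x : Int) (p : Int × Int) : Bool :=
  pvOk atoms p && (p.1 == x || p.2 == x)

-- one step of B's degree fold
def pvStep (atoms : List Int) (d : PySem.Dict Int Int) (p : Int × Int) : PySem.Dict Int Int :=
  if pvOk atoms p then
    let d1 := d.insert p.1 (d.getD p.1 0 + 1)
    d1.insert p.2 (d1.getD p.2 0 + 1)
  else d

theorem getD_pvStep (atoms : List Int) (d : PySem.Dict Int Int) (p : Int × Int) (x : Int) :
    (pvStep atoms d p).getD x 0 = d.getD x 0 + (if pvQ atoms x p then 1 else 0) := by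
  unfold pvStep pvQ
  by_cases hok : pvOk atoms p
  · have hne : p.1 ≠ p.2 := by
      have := hok
      unfold pvOk at this
      simp at this
      omega
    simp only [hok, if_true, PySem.Dict.getD_insert]
    by_cases h2 : x = p.2
    · subst h2
      simp [Ne.symm hne]
    · by_cases h1 : x = p.1
      · subst h1
        simp [h2, Ne.symm h2]
      · simp [h1, h2, Ne.symm h1, Ne.symm h2]
  · simp [hok]

theorem getD_foldl_pvStep (atoms : List Int) (l : List (Int × Int))
    (d : PySem.Dict Int Int) (x : Int) :
    (l.foldl (pvStep atoms) d).getD x 0 = d.getD x 0 + (l.countP (pvQ atoms x) : Int) := by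
  induction l generalizing d with
  | nil => simp
  | cons p l ih =>
    rw [List.foldl_cons, ih, getD_pvStep, List.countP_cons]
    by_cases h : pvQ atoms x p <;> simp [h] <;> push_cast <;> ring

-- the endpoint of p other than x
def pvOther (x : Int) (p : Int × Int) : Int := if p.1 = x then p.2 else p.1

theorem pvSort_other (x : Int) (p : Int × Int) (hlt : p.1 < p.2)
    (hx : p.1 = x ∨ p.2 = x) : pySortPair x (pvOther x p) = p := by
  unfold pvOther pySortPair
  by_cases h1 : p.1 = x
  · subst h1
    rw [if_pos rfl, if_pos (le_of_lt hlt)]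
  · rcases hx with h | h
    · exact absurd h h1
    · subst h
      rw [if_neg h1, if_neg (by omega)]

-- edges incident to x (counted by B) are in bijection with x's in-cycle BCP
-- neighbours (counted by A), via p ↦ pvOther x p
theorem countP_edges_eq (atoms : List Int) (bcp_set : List (Int × Int))
    (hnd : atoms.Nodup) (x : Int) (hx : x ∈ atoms) :
    ((PySem.Set.ofList bcp_set).countP (pvQ atoms x) : Nat)
      = (atoms.filter (fun n => n != x && bcp_set.contains (pySortPair x n))).length := by
  have hednd : (PySem.Set.ofList bcp_set).Nodup := PySem.Set.nodup_ofList bcp_set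
  rw [List.countP_eq_length_filter,
    ← List.toFinset_card_of_nodup (hednd.filter _),
    ← List.toFinset_card_of_nodup (hnd.filter _)]
  apply Finset.card_bij (fun p _ => pvOther x p)
  · intro p hp
    rw [List.mem_toFinset, List.mem_filter] at hp
    rcases hp with ⟨hpe, hq⟩
    unfold pvQ pvOk at hq
    simp only [Bool.and_eq_true, decide_eq_true_eq, Bool.or_eq_true, beq_iff_eq] at hq
    rcases hq with ⟨⟨⟨hlt, hc1⟩, hc2⟩, hx12⟩
    rw [List.mem_toFinset, List.mem_filter]
    constructor
    · unfold pvOther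
      split_ifs with h1
      · simpa using hc2
      · simpa using hc1
    · have hons : pySortPair x (pvOther x p) = p := pvSort_other x p hlt hx12
      have hne : pvOther x p ≠ x := by
        unfold pvOther
        split_ifs with h1
        · omega
        · rcases hx12 with h | h
          · exact absurd h h1
          · omega
      simp only [Bool.and_eq_true, bne_iff_ne, ne_eq]
      refine ⟨hne, ?_⟩
      rw [hons]
      simpa [List.contains_eq_mem] using (PySem.Set.mem_ofList bcp_set p).1 hpe
  · intro p hp q hq hpq
    rw [List.mem_toFinset, List.mem_filter] at hp hq
    have hqp : pvQ atoms x p = true := hp.2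
    have hqq : pvQ atoms x q = true := hq.2
    unfold pvQ pvOk at hqp hqq
    simp only [Bool.and_eq_true, decide_eq_true_eq, Bool.or_eq_true, beq_iff_eq] at hqp hqq
    rw [← pvSort_other x p hqp.1.1.1 hqp.2, ← pvSort_other x q hqq.1.1.1 hqq.2, hpq]
  · intro y hy
    rw [List.mem_toFinset, List.mem_filter] at hy
    rcases hy with ⟨hya, hyq⟩
    simp only [Bool.and_eq_true, bne_iff_ne, ne_eq] at hyq
    rcases hyq with ⟨hyx, hybcp⟩
    have hpe : pySortPair x y ∈ PySem.Set.ofList bcp_set := by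
      rw [PySem.Set.mem_ofList]
      simpa [List.contains_eq_mem] using hybcp
    rcases lt_trichotomy x y with h | h | h
    · have hsp : pySortPair x y = (x, y) := by
        unfold pySortPair
        rw [if_pos (le_of_lt h)]
      refine ⟨pySortPair x y, ?_, ?_⟩
      · rw [List.mem_toFinset, List.mem_filter]
        refine ⟨hpe, ?_⟩
        unfold pvQ pvOk
        rw [hsp]
        simp [List.contains_eq_mem, h, hx, hya]
      · rw [hsp]
        unfold pvOther
        simp
    · exact absurd h.symm hyx
    · have hsp : pySortPair x y = (y, x) := by
        unfold pySortPair
        rw [if_neg (by omega)]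
      refine ⟨pySortPair x y, ?_, ?_⟩
      · rw [List.mem_toFinset, List.mem_filter]
        refine ⟨hpe, ?_⟩
        unfold pvQ pvOk
        rw [hsp]
        simp [List.contains_eq_mem, h, hx, hya]
      · rw [hsp]
        unfold pvOther
        rw [if_neg (by simpa using hyx)]

-- ===== VERDICT (by name: the statement is the Claim_ definition above) =====
theorem is_valid_cycle_spec : Claim_equal_is_valid_cycle := by
  intro cycle bcp_set _
  unfold Spec_is_valid_cycle
  simp only [is_valid_cycle, is_valid_cycle_alt]
  set atoms := PySem.Set.ofList cycle with hatoms
  have hnd : atoms.Nodup := PySem.Set.nodup_ofList cycle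
  have hfold : ∀ x : Int,
      ((PySem.Set.ofList bcp_set).foldl (fun d p =>
        if decide (p.1 < p.2) && atoms.contains p.1 && atoms.contains p.2 then
          let d1 := d.insert p.1 (d.getD p.1 0 + 1)
          d1.insert p.2 (d1.getD p.2 0 + 1)
        else d) PySem.Dict.empty).getD x 0
        = ((PySem.Set.ofList bcp_set).countP (pvQ atoms x) : Int) := by
    intro x
    have : (fun (d : PySem.Dict Int Int) (p : Int × Int) =>
        if decide (p.1 < p.2) && atoms.contains p.1 && atoms.contains p.2 then
          let d1 := d.insert p.1 (d.getD p.1 0 + 1)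
          d1.insert p.2 (d1.getD p.2 0 + 1)
        else d) = pvStep atoms := by
      funext d p
      unfold pvStep pvOk
      rfl
    rw [this, getD_foldl_pvStep]
    simp
  rw [Bool.eq_iff_iff]
  simp only [List.all_eq_true]
  constructor
  · intro hA x hx
    have hxc : x ∈ cycle := (PySem.Set.mem_ofList ..).1 hx
    have := hA x hxc
    rw [hfold x, countP_edges_eq atoms bcp_set hnd x hx]
    simp only [beq_iff_eq] at this ⊢
    exact_mod_cast this
  · intro hB x hx
    have hxa : x ∈ atoms := (PySem.Set.mem_ofList ..).2 hx
    have := hB x hxa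
    rw [hfold x, countP_edges_eq atoms bcp_set hnd x hxa] at this
    simp only [beq_iff_eq] at this ⊢
    exact_mod_cast this
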